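-- pv_equiv track=rewrite | github.com/AkBKukU/server-fan-control | temp-control.py | check_temps
-- ===== SOURCE A (Python) =====
-- config={
--     # Thresholds [ cold, warm, overheat ]
--     "thresholds": { "drives":[44,47,50], "cpus":[55, 60, 70] },
--     # Max Influence on fans (ie, drives have 0% influence on CPU cooler fans)
--     "fan_influence":{ "drives":[0,0,0.6,0.6,0.6,1], "cpus":[1,1,0.4,0.4,0.4,1]},
--     # Rate fan speeds change when past thresholds
--     "fan_aggression":{"drives":[-0.1,0,0.1,3],"cpus":[-1,0,1,5]},
--     # Minimum fan speeds, dynamic values scale between these and 100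
--     # (zone independant)
--     "fan_minimum":[30,30,30,30,30,50]
--     }
--
-- def check_temps(temps, zone):
--     max_state=0
--     for name,temp in temps.items():
--         if temp > config["thresholds"][zone][2]:
--             max_state=3
--         elif temp > config["thresholds"][zone][1]:
--             max_state=2 if max_state < 2 else max_state
--         elif temp > config["thresholds"][zone][0]:
--             max_state=1 if max_state < 1 else max_state
--     return max_state
-- ===== SOURCE B (Python) =====
-- config={
--     "thresholds": { "drives":[44,47,50], "cpus":[55, 60, 70] },
--     "fan_influence":{ "drives":[0,0,0.6,0.6,0.6,1], "cpus":[1,1,0.4,0.4,0.4,1]},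
--     "fan_aggression":{"drives":[-0.1,0,0.1,3],"cpus":[-1,0,1,5]},
--     "fan_minimum":[30,30,30,30,30,50]
--     }
--
-- def check_temps(temps, zone):
--     if not temps:
--         return 0
--     hi = max(temps.values())
--     return sum(hi > t for t in config["thresholds"][zone])
-- ===== Notes on version B (the rewrite author's own statement) =====
-- stated objective: simpler
-- what changed: Replaces the per-reading accumulating state machine with a max reduction over the temperatures followed by counting how many (sorted) thresholds that maximum exceeds, so the branching if/elif bucket logic disappears entirely.
import Mathlib
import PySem

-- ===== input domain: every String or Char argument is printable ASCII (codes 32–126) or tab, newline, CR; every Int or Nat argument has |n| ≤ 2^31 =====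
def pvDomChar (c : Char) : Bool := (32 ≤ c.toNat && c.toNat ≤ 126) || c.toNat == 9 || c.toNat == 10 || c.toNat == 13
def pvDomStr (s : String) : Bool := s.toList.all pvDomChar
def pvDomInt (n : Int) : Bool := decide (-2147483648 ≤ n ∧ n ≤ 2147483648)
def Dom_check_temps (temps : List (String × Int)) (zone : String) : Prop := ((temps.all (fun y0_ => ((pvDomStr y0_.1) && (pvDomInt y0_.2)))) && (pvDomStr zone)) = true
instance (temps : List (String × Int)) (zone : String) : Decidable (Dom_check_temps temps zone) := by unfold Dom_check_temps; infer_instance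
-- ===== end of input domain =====

-- B replaces A's per-reading state machine by a max reduction plus a count of thresholds exceeded; objective: simpler.

-- ===== PORT A =====
def pyConfigThresholds : PySem.Dict String (List Int) :=
  PySem.Dict.ofList [("drives", [44, 47, 50]), ("cpus", [55, 60, 70])]

def check_temps (temps : List (String × Int)) (zone : String) : Int :=
  temps.foldl
    (fun max_state nt =>
      let th := (PySem.Dict.get? pyConfigThresholds zone).getD []
      if nt.2 > (PySem.List.pyGet? th 2).getD 0 then 3
      else if nt.2 > (PySem.List.pyGet? th 1).getD 0 then
        (if max_state < 2 then 2 else max_state)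
      else if nt.2 > (PySem.List.pyGet? th 0).getD 0 then
        (if max_state < 1 then 1 else max_state)
      else max_state)
    0

-- ===== PORT B =====
def check_temps_alt (temps : List (String × Int)) (zone : String) : Int :=
  match temps with
  | [] => 0
  | _ :: _ =>
    match PySem.List.max? (temps.map Prod.snd) (fun x => x) with
    | none => 0  -- unreachable: temps ≠ []
    | some hi =>
      ((PySem.Dict.get? pyConfigThresholds zone).getD []).foldl
        (fun acc t => acc + (if hi > t then 1 else 0)) 0

-- ===== PRECONDITION & SPEC =====
-- Pre_ excludes exactly the inputs where both Pythons raise KeyError: a zone other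
-- than "drives"/"cpus" together with a nonempty temps dict (with empty temps neither
-- program reaches the config lookup and both return 0).
def Pre_check_temps (temps : List (String × Int)) (zone : String) : Prop :=
  zone = "drives" ∨ zone = "cpus" ∨ temps = []
instance (temps : List (String × Int)) (zone : String) : Decidable (Pre_check_temps temps zone) := by
  unfold Pre_check_temps; infer_instance

def pvWitness_check_temps : (List (String × Int)) × String := ([("cpu0", 61)], "cpus")

def Spec_check_temps (temps : List (String × Int)) (zone : String) (out : Int) : Prop := out = check_temps_alt temps zone
instance (temps : List (String × Int)) (zone : String) (out : Int) : Decidable (Spec_check_temps temps zone out) := by unfold Spec_check_temps; infer_instance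

-- ===== CLAIM (what is proved, stated in full; the proofs are below) =====
def Claim_equal_check_temps : Prop := ∀ (temps : List (String × Int)) (zone : String), Dom_check_temps temps zone → Pre_check_temps temps zone → Spec_check_temps temps zone (check_temps temps zone)

-- ===== LEMMAS AND PROOFS =====

-- one A-step equals max with the bucket value, provided the state is in [0,3]
theorem pv_step_eq_max (t0 t1 t2 m t : Int) (h0 : 0 ≤ m) (h3 : m ≤ 3) :
    (if t > t2 then (3:Int) else if t > t1 then (if m < 2 then 2 else m)
     else if t > t0 then (if m < 1 then 1 else m) else m)
    = max m (if t > t2 then (3:Int) else if t > t1 then 2 else if t > t0 then 1 else 0) := by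
  split_ifs <;> omega

theorem pv_bucket_bounds (t0 t1 t2 t : Int) :
    0 ≤ (if t > t2 then (3:Int) else if t > t1 then 2 else if t > t0 then 1 else 0) ∧
    (if t > t2 then (3:Int) else if t > t1 then 2 else if t > t0 then 1 else 0) ≤ 3 := by
  split_ifs <;> omega

-- the bucket of a max is the max of the buckets (thresholds ordered)
theorem pv_bucket_max (t0 t1 t2 : Int) (_h01 : t0 ≤ t1) (_h12 : t1 ≤ t2) (a b : Int) :
    (if max a b > t2 then (3:Int) else if max a b > t1 then 2 else if max a b > t0 then 1 else 0)
    = max (if a > t2 then (3:Int) else if a > t1 then 2 else if a > t0 then 1 else 0)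
          (if b > t2 then (3:Int) else if b > t1 then 2 else if b > t0 then 1 else 0) := by
  rcases le_total a b with h | h <;> split_ifs <;> omega

-- A's fold from a bucket seed equals the bucket of the running max
theorem pv_fold_eq_bucket_max (t0 t1 t2 : Int) (h01 : t0 ≤ t1) (h12 : t1 ≤ t2)
    (l : List (String × Int)) (x : Int) :
    l.foldl
      (fun m nt =>
        if nt.2 > t2 then (3:Int) else if nt.2 > t1 then (if m < 2 then 2 else m)
        else if nt.2 > t0 then (if m < 1 then 1 else m) else m)
      (if x > t2 then (3:Int) else if x > t1 then 2 else if x > t0 then 1 else 0)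
    = (if (l.map Prod.snd).foldl max x > t2 then (3:Int)
       else if (l.map Prod.snd).foldl max x > t1 then 2
       else if (l.map Prod.snd).foldl max x > t0 then 1 else 0) := by
  induction l generalizing x with
  | nil => simp
  | cons p rest ih =>
    simp only [List.foldl_cons, List.map_cons]
    obtain ⟨hb0, hb3⟩ := pv_bucket_bounds t0 t1 t2 x
    rw [pv_step_eq_max t0 t1 t2 _ p.2 hb0 hb3, ← pv_bucket_max t0 t1 t2 h01 h12 x p.2,
        ih (max x p.2)]
    rfl

-- A's fold equals the bucket of the overall max (PySem.List.max? form)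
theorem pv_main (t0 t1 t2 : Int) (h01 : t0 ≤ t1) (h12 : t1 ≤ t2)
    (temps : List (String × Int)) :
    temps.foldl
      (fun m nt =>
        if nt.2 > t2 then (3:Int) else if nt.2 > t1 then (if m < 2 then 2 else m)
        else if nt.2 > t0 then (if m < 1 then 1 else m) else m)
      0
    = match PySem.List.max? (temps.map Prod.snd) (fun x => x) with
      | none => 0
      | some hi => if hi > t2 then (3:Int) else if hi > t1 then 2 else if hi > t0 then 1 else 0 := by
  cases temps with
  | nil => simp [PySem.List.max?]
  | cons p rest =>
    simp only [List.map_cons, PySem.List.max?_id_cons]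
    rw [List.foldl_cons]
    have hstep : (if p.2 > t2 then (3:Int) else if p.2 > t1 then (if (0:Int) < 2 then 2 else 0)
        else if p.2 > t0 then (if (0:Int) < 1 then 1 else 0) else 0)
        = (if p.2 > t2 then (3:Int) else if p.2 > t1 then 2 else if p.2 > t0 then 1 else 0) := by
      split_ifs <;> omega
    rw [hstep, pv_fold_eq_bucket_max t0 t1 t2 h01 h12 rest p.2, List.foldl_map]

-- the if/elif bucket equals the count of thresholds exceeded (thresholds ordered)
theorem pv_bucket_eq_count (t0 t1 t2 hi : Int) (h01 : t0 ≤ t1) (h12 : t1 ≤ t2) :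
    (if hi > t2 then (3:Int) else if hi > t1 then 2 else if hi > t0 then 1 else 0)
    = [t0, t1, t2].foldl (fun acc t => acc + (if hi > t then 1 else 0)) 0 := by
  simp only [List.foldl_cons, List.foldl_nil]
  split_ifs <;> omega

-- ===== VERDICT (by name: the statement is the Claim_ definition above) =====
theorem check_temps_spec : Claim_equal_check_temps := by
  intro temps zone _ hpre
  unfold Spec_check_temps check_temps check_temps_alt
  rcases hpre with h | h | h
  · subst h
    simp only [show (PySem.Dict.get? pyConfigThresholds "drives").getD [] = [44,47,50] from by decide,
               show (PySem.List.pyGet? [(44:Int),47,50] 2).getD 0 = 50 from by decide,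
               show (PySem.List.pyGet? [(44:Int),47,50] 1).getD 0 = 47 from by decide,
               show (PySem.List.pyGet? [(44:Int),47,50] 0).getD 0 = 44 from by decide]
    rw [pv_main 44 47 50 (by omega) (by omega) temps]
    cases temps with
    | nil => simp [PySem.List.max?]
    | cons p rest =>
      simp only [List.map_cons, PySem.List.max?_id_cons]
      exact pv_bucket_eq_count 44 47 50 _ (by omega) (by omega)
  · subst h
    simp only [show (PySem.Dict.get? pyConfigThresholds "cpus").getD [] = [55,60,70] from by decide,
               show (PySem.List.pyGet? [(55:Int),60,70] 2).getD 0 = 70 from by decide,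
               show (PySem.List.pyGet? [(55:Int),60,70] 1).getD 0 = 60 from by decide,
               show (PySem.List.pyGet? [(55:Int),60,70] 0).getD 0 = 55 from by decide]
    rw [pv_main 55 60 70 (by omega) (by omega) temps]
    cases temps with
    | nil => simp [PySem.List.max?]
    | cons p rest =>
      simp only [List.map_cons, PySem.List.max?_id_cons]
      exact pv_bucket_eq_count 55 60 70 _ (by omega) (by omega)
  · subst h; simp
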